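-- pv_equiv track=rewrite | github.com/Fabioburgos/Lilo_test1 | processcsv.py | solve_subset_sum
-- ===== SOURCE A (Python) =====
-- def solve_subset_sum(big_number, small_numbers):
--     """
--     Finds the subset of small_numbers that sums closest to big_number without exceeding it.
--     This function uses a dynamic programming approach, similar to the 0/1 knapsack problem.
--
--     Args:
--         big_number (int): The target number.
--         small_numbers (list): A list of numbers to choose from.
--
--     Returns:
--         tuple: A tuple containing the list of selected numbers and their sum.
--     """
--     # dp stores the achievable sums and the combinations to get them.
--     dp = {0: []}
--
--     # Iterate through each small number
--     for num in small_numbers: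
--         # Create a new dictionary to store the sums we can make with the current number
--         new_sums = {}
--         for current_sum, combination in dp.items():
--             new_sum = current_sum + num
--             # If the new sum is within our target and we haven't found a combination for it yet
--             if new_sum <= big_number:
--                 if new_sum not in dp:
--                     new_sums[new_sum] = combination + [num]
--         # Update our main dp table with the new sums found
--         dp.update(new_sums)
--
--     # Find the sum in our dp table that is closest to the big_number
--     best_sum = 0
--     # Iterate through all possible sums we've calculated
--     for s in dp.keys():
--         if s > best_sum:
--             best_sum = s
--
--     return dp.get(best_sum, []), best_sum
-- ===== SOURCE B (Python) =====
-- def solve_subset_sum(big_number, small_numbers):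
--     """Same result as A, but stores one parent pointer per achievable sum
--     instead of copying whole combination lists, and rebuilds the chosen
--     combination once at the end by backtracking."""
--     parent = {0: None}
--     for num in small_numbers:
--         for s in list(parent.keys()):
--             t = s + num
--             if t <= big_number and t not in parent:
--                 parent[t] = (s, num)
--     best = max((s for s in parent if s > 0), default=0)
--     combo = []
--     s = best
--     while parent[s] is not None:
--         ps, num = parent[s]
--         combo.append(num)
--         s = ps
--     combo.reverse()
--     return combo, best
-- ===== Notes on version B (the rewrite author's own statement) =====
-- stated objective: alternative
-- what changed: Replaces the dict of full combination lists (each new sum copies a whole list) by a dict of parent pointers (sum -> (previous sum, number)), reconstructing the chosen combination once at the end by backtracking.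
import Mathlib
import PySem

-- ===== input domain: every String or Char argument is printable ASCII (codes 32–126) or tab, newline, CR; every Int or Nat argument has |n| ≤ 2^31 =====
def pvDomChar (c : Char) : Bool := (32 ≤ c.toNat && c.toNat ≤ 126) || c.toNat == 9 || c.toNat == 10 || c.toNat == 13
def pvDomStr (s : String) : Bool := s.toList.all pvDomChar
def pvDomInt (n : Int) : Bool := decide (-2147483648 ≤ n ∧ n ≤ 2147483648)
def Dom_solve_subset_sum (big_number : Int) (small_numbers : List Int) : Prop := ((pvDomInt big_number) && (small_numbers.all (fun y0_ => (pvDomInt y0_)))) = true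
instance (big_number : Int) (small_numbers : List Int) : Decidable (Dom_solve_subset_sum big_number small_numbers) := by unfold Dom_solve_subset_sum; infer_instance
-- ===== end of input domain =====

-- B replaces A's dict of full combination lists by a dict of parent pointers
-- (sum -> (previous sum, number)) with a single backtracking pass at the end
-- (objective: alternative — a different data structure, measured cost is similar).


-- ===== PORT A =====
def solve_subset_sum (big_number : Int) (small_numbers : List Int) : List Int × Int :=
  -- dp = {0: []}; for num in small_numbers: build new_sums from dp.items(), then dp.update(new_sums)
  let dp : PySem.Dict Int (List Int) :=
    small_numbers.foldl (fun dp num =>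
      let new_sums : PySem.Dict Int (List Int) :=
        dp.items.foldl (fun ns p =>
          let new_sum := p.1 + num
          if new_sum ≤ big_number then
            if dp.contains new_sum = true then ns
            else ns.insert new_sum (p.2 ++ [num])
          else ns) PySem.Dict.empty
      dp.update new_sums.items)
      (PySem.Dict.ofList [(0, [])])
  -- best_sum = 0; for s in dp.keys(): if s > best_sum: best_sum = s
  let best_sum := dp.keys.foldl (fun b s => if s > b then s else b) 0
  (dp.getD best_sum [], best_sum)

-- ===== PORT B =====
-- 'while parent[s] is not None: combo.append(num); s = ps' — fuel = parent.size
-- (each chain step moves to a strictly earlier dict entry, so dict size is enough fuel)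
def pvBacktrack (parent : PySem.Dict Int (Option (Int × Int))) :
    Nat → Int → List Int → List Int
  | 0, _, acc => acc
  | fuel + 1, s, acc =>
    match parent.get? s with
    | some (some (ps, num)) => pvBacktrack parent fuel ps (acc ++ [num])
    | _ => acc

def solve_subset_sum_alt (big_number : Int) (small_numbers : List Int) : List Int × Int :=
  -- parent = {0: None}; for num: for s in list(parent.keys()): maybe parent[s+num] = (s, num)
  let parent : PySem.Dict Int (Option (Int × Int)) :=
    small_numbers.foldl (fun par num =>
      par.keys.foldl (fun acc s =>
        let t := s + num
        if t ≤ big_number ∧ acc.contains t = false then acc.insert t (some (s, num))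
        else acc) par)
      (PySem.Dict.ofList [(0, none)])
  -- best = max((s for s in parent if s > 0), default=0)
  let best := PySem.List.maxD (parent.keys.filter (fun s => decide (0 < s))) (fun y => y) 0
  -- combo = []; backtrack appending nums; combo.reverse()
  ((pvBacktrack parent parent.size best []).reverse, best)

-- ===== PRECONDITION & SPEC =====
def Spec_solve_subset_sum (big_number : Int) (small_numbers : List Int) (out : List Int × Int) : Prop := out = solve_subset_sum_alt big_number small_numbers
instance (big_number : Int) (small_numbers : List Int) (out : List Int × Int) : Decidable (Spec_solve_subset_sum big_number small_numbers out) := by unfold Spec_solve_subset_sum; infer_instance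

-- ===== CLAIM (what is proved, stated in full; the proofs are below) =====
def Claim_equal_solve_subset_sum : Prop := ∀ (big_number : Int) (small_numbers : List Int), Dom_solve_subset_sum big_number small_numbers → Spec_solve_subset_sum big_number small_numbers (solve_subset_sum big_number small_numbers)

-- ===== LEMMAS AND PROOFS =====

-- Every parent entry either is the root (combination []) or points to an
-- earlier entry, and dp stores exactly the combination reached along the chain.
def pvChains (dp : PySem.Dict Int (List Int))
    (l : List (Int × Option (Int × Int))) : Prop :=
  ∀ i, (h : i < l.length) →
    ((l[i]'h).2 = none → dp.getD (l[i]'h).1 [] = []) ∧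
    (∀ ps num, (l[i]'h).2 = some (ps, num) →
      (∃ j, ∃ hj : j < l.length, j < i ∧ (l[j]'hj).1 = ps) ∧
      dp.getD (l[i]'h).1 [] = dp.getD ps [] ++ [num])

-- The simulation invariant between A's dp and B's parent dict.
def pvRel (dp : PySem.Dict Int (List Int))
    (par : PySem.Dict Int (Option (Int × Int))) : Prop :=
  dp.keys = par.keys ∧ dp.keys.Nodup ∧ (0 : Int) ∈ dp.keys ∧ pvChains dp par.items

theorem pvGetD_of_prefix (dp dp' : PySem.Dict Int (List Int))
    (rest : List (Int × List Int)) (hit : dp'.items = dp.items ++ rest)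
    (hnd : dp.keys.Nodup) (hnd' : dp'.keys.Nodup) {k : Int} (hk : k ∈ dp.keys) :
    dp'.getD k [] = dp.getD k [] := by
  simp only [PySem.Dict.keys, List.mem_map] at hk
  obtain ⟨p, hp, hp1⟩ := hk
  have hpk : (k, p.2) ∈ dp.items := by rwa [← hp1]
  have h1 : dp.getD k [] = p.2 := PySem.Dict.getD_of_mem_items dp hpk hnd []
  have h2 : dp'.getD k [] = p.2 :=
    PySem.Dict.getD_of_mem_items dp' (by rw [hit]; exact List.mem_append_left _ hpk) hnd' []
  rw [h1, h2]

theorem pvBacktrack_of_chains (dp : PySem.Dict Int (List Int))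
    (par : PySem.Dict Int (Option (Int × Int)))
    (hnd : par.keys.Nodup) (hch : pvChains dp par.items) :
    ∀ i, ∀ h : i < par.items.length, ∀ fuel acc, i < fuel →
      pvBacktrack par fuel (par.items[i]'h).1 acc
        = acc ++ (dp.getD (par.items[i]'h).1 []).reverse := by
  intro i
  induction i using Nat.strong_induction_on with
  | _ i ih =>
    intro h fuel acc hfuel
    cases fuel with
    | zero => omega
    | succ f =>
      have hmem : par.items[i]'h ∈ par.items := List.getElem_mem h
      have hget : par.get? (par.items[i]'h).1 = some (par.items[i]'h).2 :=
        PySem.Dict.get?_of_mem_items par (by exact hmem) hnd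
      rcases hv : (par.items[i]'h).2 with _ | ⟨ps, num⟩
      · have hgd := (hch i h).1 hv
        simp [pvBacktrack, hget, hv, hgd]
      · obtain ⟨⟨j, hj, hji, hpj⟩, heq⟩ := (hch i h).2 ps num hv
        have hrec := ih j hji hj f (acc ++ [num]) (by omega)
        rw [hpj] at hrec
        simp only [pvBacktrack, hget, hv]
        rw [hrec, heq]
        simp

-- A's running-max loop is a fold of max
theorem pvFoldl_if_max (l : List Int) :
    l.foldl (fun b s => if s > b then s else b) 0 = l.foldl max 0 := by
  refine PySem.List.foldl_congr_mem l _ _ 0 ?_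
  intro b s _
  simp only [gt_iff_lt, max_def]
  split_ifs <;> omega

-- A's running-max loop equals B's max-of-positive-keys-with-default
theorem pvBest_eq (l : List Int) :
    l.foldl (fun b s => if s > b then s else b) 0
      = PySem.List.maxD (l.filter (fun s => decide (0 < s))) (fun y => y) 0 := by
  rw [pvFoldl_if_max]
  rcases hf : l.filter (fun s => decide (0 < s)) with _ | ⟨x, t⟩
  · simp only [PySem.List.maxD, PySem.List.max?, List.foldl_nil, Option.getD_none]
    have hall : ∀ y ∈ l, y ≤ 0 := by
      intro y hy
      by_contra hpos
      have : y ∈ l.filter (fun s => decide (0 < s)) := by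
        simp [List.mem_filter, hy]; omega
      simp [hf] at this
    rcases PySem.List.foldl_max_mem l 0 with h | h
    · simpa using h
    · have := hall _ h
      have h0 := (PySem.List.le_foldl_max l 0).1
      omega
  · have hY : PySem.List.maxD (x :: t) (fun y => y) 0 = t.foldl max x := by
      simp [PySem.List.maxD, PySem.List.max?_id_cons]
    rw [hY]
    have hsome : PySem.List.max? (x :: t) (fun y => y) = some (t.foldl max x) :=
      PySem.List.max?_id_cons x t
    have hmem : t.foldl max x ∈ x :: t := by
      rcases PySem.List.foldl_max_mem t x with h | h
      · simp [h]
      · simp [h]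
    have hmeml : t.foldl max x ∈ l := by
      exact (List.mem_filter.1 (by rw [← hf] at hmem; exact hmem)).1
    have hpos : 0 < t.foldl max x := by
      have : t.foldl max x ∈ l.filter (fun s => decide (0 < s)) := by rw [hf]; exact hmem
      have := (List.mem_filter.1 this).2
      simpa using this
    have h1 : t.foldl max x ≤ l.foldl max 0 := (PySem.List.le_foldl_max l 0).2 _ hmeml
    have h2 : l.foldl max 0 ≤ t.foldl max x := by
      rcases PySem.List.foldl_max_mem l 0 with h | h
      · omega
      · by_cases hp : 0 < l.foldl max 0
        · have : l.foldl max 0 ∈ l.filter (fun s => decide (0 < s)) := by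
            simp [List.mem_filter, h]; omega
          rw [hf] at this
          exact PySem.List.max?_isMax hsome _ this
        · have := (PySem.List.le_foldl_max l 0).1
          omega
    omega

-- one round of A, characterised: fresh entries are appended
theorem pvStepA_items (big num : Int) (dp : PySem.Dict Int (List Int))
    (hnd : dp.keys.Nodup) :
    (PySem.Dict.update dp
      (dp.items.foldl (fun ns p =>
          let new_sum := p.1 + num
          if new_sum ≤ big then
            if dp.contains new_sum = true then ns
            else ns.insert new_sum (p.2 ++ [num])
          else ns) PySem.Dict.empty).items).items
    = dp.items ++
      (dp.items.filter (fun p => decide (p.1 + num ≤ big ∧ dp.contains (p.1 + num) = false))).map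
        (fun p => (p.1 + num, p.2 ++ [num])) := by
  set F := dp.items.filter (fun p => decide (p.1 + num ≤ big ∧ dp.contains (p.1 + num) = false)) with hF
  have hFnodup : (F.map (fun p => p.1 + num)).Nodup := by
    have h1 : (F.map Prod.fst).Sublist dp.keys := by
      simpa [PySem.Dict.keys] using (List.filter_sublist (l := dp.items)).map Prod.fst
    have h2 : (F.map Prod.fst).Nodup := h1.nodup hnd
    have : F.map (fun p => p.1 + num) = (F.map Prod.fst).map (· + num) := by
      simp [List.map_map, Function.comp]
    rw [this]
    exact h2.map (fun a b hab => by omega)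
  have hcongr : dp.items.foldl (fun ns p =>
          let new_sum := p.1 + num
          if new_sum ≤ big then
            if dp.contains new_sum = true then ns
            else ns.insert new_sum (p.2 ++ [num])
          else ns) PySem.Dict.empty
      = F.foldl (fun ns p => ns.insert (p.1 + num) (p.2 ++ [num])) PySem.Dict.empty := by
    rw [hF, ← PySem.List.foldl_ite_eq_foldl_filter
      (p := fun p : Int × List Int => p.1 + num ≤ big ∧ dp.contains (p.1 + num) = false)]
    refine PySem.List.foldl_congr_mem _ _ _ _ ?_
    intro ns p _
    by_cases h1 : p.1 + num ≤ big <;> by_cases h2 : dp.contains (p.1 + num) = true <;>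
      simp_all
  have hns : (dp.items.foldl (fun ns p =>
          let new_sum := p.1 + num
          if new_sum ≤ big then
            if dp.contains new_sum = true then ns
            else ns.insert new_sum (p.2 ++ [num])
          else ns) PySem.Dict.empty).items
      = F.map (fun p => (p.1 + num, p.2 ++ [num])) := by
    rw [hcongr]
    have := PySem.Dict.items_foldl_insert_fresh F (fun p => p.1 + num) (fun p => p.2 ++ [num])
      PySem.Dict.empty (fun a _ => by simp) hFnodup
    simpa using this
  rw [hns]
  unfold PySem.Dict.update
  have hfresh : ∀ a ∈ F.map (fun p => (p.1 + num, p.2 ++ [num])), dp.contains a.1 = false := by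
    intro a ha
    simp only [List.mem_map] at ha
    obtain ⟨p, hp, rfl⟩ := ha
    have := (List.mem_filter.1 (hF ▸ hp)).2
    simp at this
    exact this.2
  have hmnd : ((F.map (fun p => (p.1 + num, p.2 ++ [num]))).map Prod.fst).Nodup := by
    simpa [List.map_map, Function.comp] using hFnodup
  have := PySem.Dict.items_foldl_insert_fresh (F.map (fun p => (p.1 + num, p.2 ++ [num])))
    Prod.fst Prod.snd dp hfresh hmnd
  simpa using this

-- one round of B, generalised over the already-processed prefix of the key snapshot
theorem pvStepB_aux (big num : Int) (par : PySem.Dict Int (Option (Int × Int)))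
    (hnd : par.keys.Nodup) :
    ∀ (l pre : List Int) (acc : PySem.Dict Int (Option (Int × Int))),
      par.keys = pre ++ l →
      acc.items = par.items ++
        (pre.filter (fun s => decide (s + num ≤ big ∧ par.contains (s + num) = false))).map
          (fun s => (s + num, some (s, num))) →
      (l.foldl (fun acc s =>
          let t := s + num
          if t ≤ big ∧ acc.contains t = false then acc.insert t (some (s, num))
          else acc) acc).items
      = par.items ++
        ((pre ++ l).filter (fun s => decide (s + num ≤ big ∧ par.contains (s + num) = false))).map
          (fun s => (s + num, some (s, num))) := by
  intro l
  induction l with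
  | nil =>
    intro pre acc hk hacc
    simpa using hacc
  | cons s l ih =>
    intro pre acc hk hacc
    have hkeys' : par.keys = (pre ++ [s]) ++ l := by rw [hk]; simp
    have hndkeys := hk ▸ hnd
    have hs_not_pre : s ∉ pre := by
      intro hmem
      rcases (List.nodup_append.1 hndkeys) with ⟨-, -, hdisj⟩
      exact hdisj s hmem s (by simp) rfl
    have hacckeys : acc.keys = par.keys ++
        (pre.filter (fun s => decide (s + num ≤ big ∧ par.contains (s + num) = false))).map
          (fun s => s + num) := by
      simp only [PySem.Dict.keys, hacc, List.map_append, List.map_map]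
      rfl
    have hnotnew : (s + num) ∉
        ((pre.filter (fun s => decide (s + num ≤ big ∧ par.contains (s + num) = false))).map
          (fun s => s + num)) := by
      intro hmem
      simp only [List.mem_map, List.mem_filter] at hmem
      obtain ⟨s', ⟨hs'pre, -⟩, heq⟩ := hmem
      have : s' = s := by omega
      exact hs_not_pre (this ▸ hs'pre)
    have hcont : acc.contains (s + num) = par.contains (s + num) := by
      rw [PySem.Dict.contains_eq_decide_mem_keys, PySem.Dict.contains_eq_decide_mem_keys,
        hacckeys]
      simp only [List.mem_append]
      by_cases hin : (s + num) ∈ par.keys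
      · simp [hin]
      · simp [hin]
        intro hp
        exact absurd hp hs_not_pre
    by_cases hc : s + num ≤ big ∧ par.contains (s + num) = false
    · -- the insert fires
      have hnotacck : acc.contains (s + num) = false := by rw [hcont]; exact hc.2
      have hstep : (if s + num ≤ big ∧ acc.contains (s + num) = false
            then acc.insert (s + num) (some (s, num)) else acc)
          = acc.insert (s + num) (some (s, num)) := by
        rw [if_pos ⟨hc.1, hnotacck⟩]
      have hitems' : (acc.insert (s + num) (some (s, num))).items = par.items ++
          (((pre ++ [s]).filter (fun s => decide (s + num ≤ big ∧ par.contains (s + num) = false))).map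
            (fun s => (s + num, some (s, num)))) := by
        rw [PySem.Dict.items_insert_of_not_contains acc _ hnotacck, hacc]
        simp [List.filter_append, hc.1, hc.2]
      have := ih (pre ++ [s]) (acc.insert (s + num) (some (s, num))) hkeys' hitems'
      simp only [List.foldl_cons]
      rw [hstep, this]
      simp
    · -- no insert
      have hstep : (if s + num ≤ big ∧ acc.contains (s + num) = false
            then acc.insert (s + num) (some (s, num)) else acc) = acc := by
        rw [if_neg]
        rw [hcont]
        exact hc
      have hitems' : acc.items = par.items ++
          (((pre ++ [s]).filter (fun s => decide (s + num ≤ big ∧ par.contains (s + num) = false))).map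
            (fun s => (s + num, some (s, num)))) := by
        rw [hacc]
        have himp : s + num ≤ big → par.contains (s + num) = true := by
          intro hble
          cases hb : par.contains (s + num)
          · exact absurd ⟨hble, hb⟩ hc
          · rfl
        simp [List.filter_append]
        exact himp
      have := ih (pre ++ [s]) acc hkeys' hitems'
      simp only [List.foldl_cons]
      rw [hstep, this]
      simp

theorem pvStepB_items (big num : Int) (par : PySem.Dict Int (Option (Int × Int)))
    (hnd : par.keys.Nodup) :
    (par.keys.foldl (fun acc s =>
        let t := s + num
        if t ≤ big ∧ acc.contains t = false then acc.insert t (some (s, num))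
        else acc) par).items
    = par.items ++
      (par.keys.filter (fun s => decide (s + num ≤ big ∧ par.contains (s + num) = false))).map
        (fun s => (s + num, some (s, num))) := by
  simpa using pvStepB_aux big num par hnd par.keys [] par (by simp) (by simp)

-- appending well-pointed fresh entries preserves the chain property
theorem pvChains_extend (num : Int) (dp' : PySem.Dict Int (List Int))
    (L : List (Int × Option (Int × Int))) (F : List (Int × List Int))
    (hold : ∀ i, ∀ h : i < L.length,
      ((L[i]'h).2 = none → dp'.getD (L[i]'h).1 [] = []) ∧
      (∀ ps nm, (L[i]'h).2 = some (ps, nm) →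
        (∃ j, ∃ hj : j < L.length, j < i ∧ (L[j]'hj).1 = ps) ∧
        dp'.getD (L[i]'h).1 [] = dp'.getD ps [] ++ [nm]))
    (hnewL : ∀ m, ∀ hm : m < F.length,
      dp'.getD ((F[m]'hm).1 + num) [] = dp'.getD (F[m]'hm).1 [] ++ [num])
    (hidx : ∀ m, ∀ hm : m < F.length,
      ∃ j, ∃ hj : j < L.length, (L[j]'hj).1 = (F[m]'hm).1) :
    pvChains dp' (L ++ F.map (fun p => (p.1 + num, some (p.1, num)))) := by
  intro i h
  by_cases hi : i < L.length
  · have hgetl : (L ++ F.map (fun p => (p.1 + num, some (p.1, num))))[i]'h = L[i]'hi :=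
      List.getElem_append_left hi
    rw [hgetl]
    refine ⟨(hold i hi).1, ?_⟩
    intro ps nm hps
    obtain ⟨⟨j, hj, hji, hpj⟩, heq⟩ := (hold i hi).2 ps nm hps
    refine ⟨⟨j, by simp; omega, hji, ?_⟩, heq⟩
    rw [List.getElem_append_left hj]
    exact hpj
  · push Not at hi
    have hm : i - L.length < F.length := by
      have := h
      simp only [List.length_append, List.length_map] at this
      omega
    have hgetr : (L ++ F.map (fun p => (p.1 + num, some (p.1, num))))[i]'h
        = ((F[i - L.length]'hm).1 + num, some ((F[i - L.length]'hm).1, num)) := by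
      rw [List.getElem_append_right hi]
      simp
    rw [hgetr]
    constructor
    · intro habs
      simp at habs
    · intro ps nm hps
      simp only [Option.some.injEq, Prod.mk.injEq] at hps
      obtain ⟨rfl, rfl⟩ := hps
      obtain ⟨j, hj, hpj⟩ := hidx (i - L.length) hm
      refine ⟨⟨j, by simp; omega, by omega, ?_⟩, ?_⟩
      · rw [List.getElem_append_left hj]
        exact hpj
      · exact hnewL (i - L.length) hm

-- the invariant is preserved by one round of both loops
theorem pvRel_step (big num : Int) (dp : PySem.Dict Int (List Int))
    (par : PySem.Dict Int (Option (Int × Int))) (hrel : pvRel dp par) :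
    pvRel
      (PySem.Dict.update dp
        (dp.items.foldl (fun ns p =>
            let new_sum := p.1 + num
            if new_sum ≤ big then
              if dp.contains new_sum = true then ns
              else ns.insert new_sum (p.2 ++ [num])
            else ns) PySem.Dict.empty).items)
      (par.keys.foldl (fun acc s =>
          let t := s + num
          if t ≤ big ∧ acc.contains t = false then acc.insert t (some (s, num))
          else acc) par) := by
  obtain ⟨hkeys, hnd, h0, hch⟩ := hrel
  have hndpar : par.keys.Nodup := hkeys ▸ hnd
  set dp' := PySem.Dict.update dp
        (dp.items.foldl (fun ns p =>
            let new_sum := p.1 + num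
            if new_sum ≤ big then
              if dp.contains new_sum = true then ns
              else ns.insert new_sum (p.2 ++ [num])
            else ns) PySem.Dict.empty).items with hdp'
  set par' := par.keys.foldl (fun acc s =>
          let t := s + num
          if t ≤ big ∧ acc.contains t = false then acc.insert t (some (s, num))
          else acc) par with hpar'
  set F := dp.items.filter (fun p => decide (p.1 + num ≤ big ∧ dp.contains (p.1 + num) = false))
    with hF
  have hA : dp'.items = dp.items ++ F.map (fun p => (p.1 + num, p.2 ++ [num])) :=
    pvStepA_items big num dp hnd
  have hconteq : ∀ k, dp.contains k = par.contains k := by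
    intro k
    rw [PySem.Dict.contains_eq_decide_mem_keys, PySem.Dict.contains_eq_decide_mem_keys, hkeys]
  have hG : par.keys.filter (fun s => decide (s + num ≤ big ∧ par.contains (s + num) = false))
      = F.map Prod.fst := by
    have h1 : par.keys = dp.items.map Prod.fst := by rw [← hkeys]; rfl
    rw [h1, List.filter_map]
    congr 1
    rw [hF]
    apply List.filter_congr
    intro p _
    simp [Function.comp, hconteq]
  have hB : par'.items = par.items ++ F.map (fun p => (p.1 + num, some (p.1, num))) := by
    rw [hpar', pvStepB_items big num par hndpar, hG, List.map_map]
    rfl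
  have hkeysA : dp'.keys = dp.keys ++ F.map (fun p => p.1 + num) := by
    simp only [PySem.Dict.keys, hA, List.map_append, List.map_map]
    rfl
  have hkeysB : par'.keys = par.keys ++ F.map (fun p => p.1 + num) := by
    simp only [PySem.Dict.keys, hB, List.map_append, List.map_map]
    rfl
  have hkeys' : dp'.keys = par'.keys := by rw [hkeysA, hkeysB, hkeys]
  have hFfst : (F.map Prod.fst).Nodup := by
    have h1 : (F.map Prod.fst).Sublist dp.keys := by
      simpa [PySem.Dict.keys] using (List.filter_sublist (l := dp.items)).map Prod.fst
    exact h1.nodup hnd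
  have hFnew : (F.map (fun p => p.1 + num)).Nodup := by
    have : F.map (fun p => p.1 + num) = (F.map Prod.fst).map (· + num) := by
      simp [List.map_map, Function.comp]
    rw [this]
    exact hFfst.map (fun a b hab => by omega)
  have hfreshkey : ∀ p ∈ F, (p.1 + num) ∉ dp.keys := by
    intro p hp
    have := (List.mem_filter.1 (hF ▸ hp)).2
    simp only [decide_eq_true_eq] at this
    rw [PySem.Dict.contains_eq_decide_mem_keys] at this
    simpa using this.2
  have hnd' : dp'.keys.Nodup := by
    rw [hkeysA, List.nodup_append]
    refine ⟨hnd, hFnew, ?_⟩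
    intro a ha b hb
    simp only [List.mem_map] at hb
    obtain ⟨p, hp, rfl⟩ := hb
    intro hab
    exact hfreshkey p hp (hab ▸ ha)
  have hold : ∀ k ∈ dp.keys, dp'.getD k [] = dp.getD k [] := by
    intro k hk
    exact pvGetD_of_prefix dp dp' _ hA hnd hnd' hk
  refine ⟨hkeys', hnd', ?_, ?_⟩
  · rw [hkeysA]; exact List.mem_append_left _ h0
  · -- chains
    rw [hB]
    apply pvChains_extend num dp' par.items F
    · -- old entries satisfy the chain conditions w.r.t. dp'
      intro i hi
      have hkmem : ∀ j, ∀ hj : j < par.items.length, (par.items[j]'hj).1 ∈ dp.keys := by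
        intro j hj
        rw [hkeys]
        exact List.mem_map.2 ⟨par.items[j]'hj, List.getElem_mem hj, rfl⟩
      refine ⟨?_, ?_⟩
      · intro hnone
        rw [hold _ (hkmem i hi)]
        exact (hch i hi).1 hnone
      · intro ps nm hps
        obtain ⟨⟨j, hj, hji, hpj⟩, heq⟩ := (hch i hi).2 ps nm hps
        have hpsmem : ps ∈ dp.keys := hpj ▸ hkmem j hj
        refine ⟨⟨j, hj, hji, hpj⟩, ?_⟩
        rw [hold _ (hkmem i hi), hold _ hpsmem]
        exact heq
    · -- the new entries: dp' maps p.1+num to dp'[p.1] ++ [num]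
      intro m hm
      have hpF : F[m]'hm ∈ F := List.getElem_mem hm
      have hFsub : F.Sublist dp.items := by rw [hF]; exact List.filter_sublist
      have hpdp : F[m]'hm ∈ dp.items := hFsub.subset hpF
      have h1 : dp'.getD ((F[m]'hm).1 + num) [] = (F[m]'hm).2 ++ [num] := by
        refine PySem.Dict.getD_of_mem_items dp' ?_ hnd' []
        rw [hA]
        refine List.mem_append_right _ (List.mem_map.2 ⟨F[m]'hm, hpF, rfl⟩)
      have hfst : (F[m]'hm).1 ∈ dp.keys :=
        List.mem_map.2 ⟨F[m]'hm, hpdp, rfl⟩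
      have h2 : dp'.getD (F[m]'hm).1 [] = (F[m]'hm).2 := by
        rw [hold _ hfst]
        exact PySem.Dict.getD_of_mem_items dp (by simpa using hpdp) hnd []
      rw [h1, h2]
    · -- each new entry's parent is an existing key
      intro m hm
      have hpF : F[m]'hm ∈ F := List.getElem_mem hm
      have hFsub : F.Sublist dp.items := by rw [hF]; exact List.filter_sublist
      have hpdp : F[m]'hm ∈ dp.items := hFsub.subset hpF
      have hfst : (F[m]'hm).1 ∈ par.items.map Prod.fst := by
        have : (F[m]'hm).1 ∈ par.keys := by
          rw [← hkeys]
          exact List.mem_map.2 ⟨F[m]'hm, hpdp, rfl⟩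
        simpa [PySem.Dict.keys] using this
      obtain ⟨q, hq, hq1⟩ := List.mem_map.1 hfst
      obtain ⟨j, hj, hjq⟩ := List.mem_iff_getElem.1 hq
      exact ⟨j, hj, by rw [hjq]; exact hq1⟩

theorem pvRel_fold (big : Int) (l : List Int) (dp : PySem.Dict Int (List Int))
    (par : PySem.Dict Int (Option (Int × Int))) (hrel : pvRel dp par) :
    pvRel
      (l.foldl (fun dp num =>
        PySem.Dict.update dp
          (dp.items.foldl (fun ns p =>
              let new_sum := p.1 + num
              if new_sum ≤ big then
                if dp.contains new_sum = true then ns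
                else ns.insert new_sum (p.2 ++ [num])
              else ns) PySem.Dict.empty).items) dp)
      (l.foldl (fun par num =>
        par.keys.foldl (fun acc s =>
          let t := s + num
          if t ≤ big ∧ acc.contains t = false then acc.insert t (some (s, num))
          else acc) par) par) := by
  induction l generalizing dp par with
  | nil => exact hrel
  | cons num l ih => exact ih _ _ (pvRel_step big num dp par hrel)

theorem pvRel_init :
    pvRel (PySem.Dict.ofList [((0 : Int), ([] : List Int))])
      (PySem.Dict.ofList [((0 : Int), (none : Option (Int × Int)))]) := by
  refine ⟨by decide, by decide, by decide, ?_⟩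
  intro i h
  have hi : i = 0 := by
    have : (PySem.Dict.ofList [((0 : Int), (none : Option (Int × Int)))]).items
        = [(0, none)] := rfl
    rw [this] at h
    simpa using h
  subst hi
  constructor
  · intro _
    show (PySem.Dict.ofList [((0 : Int), ([] : List Int))]).getD 0 [] = []
    decide
  · intro ps nm hps
    have habs : (none : Option (Int × Int)) = some (ps, nm) := hps
    simp at habs

-- ===== VERDICT (by name: the statement is the Claim_ definition above) =====
theorem solve_subset_sum_spec : Claim_equal_solve_subset_sum := by
  unfold Claim_equal_solve_subset_sum
  intro big small _hdom
  unfold Spec_solve_subset_sum solve_subset_sum solve_subset_sum_alt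
  simp only []
  obtain ⟨hkeys, hnd, h0, hch⟩ := pvRel_fold big small _ _ pvRel_init
  set dpF := small.foldl (fun dp num =>
        PySem.Dict.update dp
          (dp.items.foldl (fun ns p =>
              let new_sum := p.1 + num
              if new_sum ≤ big then
                if dp.contains new_sum = true then ns
                else ns.insert new_sum (p.2 ++ [num])
              else ns) PySem.Dict.empty).items) (PySem.Dict.ofList [(0, [])]) with hdpF
  set parF := small.foldl (fun par num =>
        par.keys.foldl (fun acc s =>
          let t := s + num
          if t ≤ big ∧ acc.contains t = false then acc.insert t (some (s, num))
          else acc) par) (PySem.Dict.ofList [(0, none)]) with hparF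
  have hbest : dpF.keys.foldl (fun b s => if s > b then s else b) 0
      = PySem.List.maxD (parF.keys.filter (fun s => decide (0 < s))) (fun y => y) 0 := by
    rw [← hkeys]
    exact pvBest_eq dpF.keys
  set best := dpF.keys.foldl (fun b s => if s > b then s else b) 0 with hbestdef
  have hbmem : best ∈ dpF.keys := by
    rw [hbestdef, pvFoldl_if_max]
    rcases PySem.List.foldl_max_mem dpF.keys 0 with h | h
    · rw [h]; exact h0
    · exact h
  have hbpar : best ∈ parF.items.map Prod.fst := by
    have : best ∈ parF.keys := hkeys ▸ hbmem
    simpa [PySem.Dict.keys] using this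
  obtain ⟨q, hq, hq1⟩ := List.mem_map.1 hbpar
  obtain ⟨j, hj, hjq⟩ := List.mem_iff_getElem.1 hq
  have hbt := pvBacktrack_of_chains dpF parF (hkeys ▸ hnd) hch j hj parF.size [] hj
  rw [hjq] at hbt
  rw [hq1] at hbt
  refine Prod.ext ?_ hbest
  simp only []
  rw [← hbest, hbt]
  simp
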